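-- pv_equiv track=rewrite | github.com/bossclement/alx-interview | 0x01-lockboxes/0-lockboxes.py | can_open_all_boxes
-- ===== SOURCE A (Python) =====
-- def can_open_all_boxes(boxes):
--     """
--     Determines if all boxes in a given list can be opened.
--
--     Args:
--         boxes: A list of lists, where each inner list represents the keys in a box.
--
--     Returns:
--         True if all boxes can be opened, False otherwise.
--     """
--
--     box_count = len(boxes)
--     unlocked_boxes = set()
--
--     for index, keys in enumerate(boxes):
--         if not keys or index == 0:
--             unlocked_boxes.add(index)
--         for key in keys:
--             if 0 <= key < box_count and key != index:
--                 unlocked_boxes.add(key)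
--         if len(unlocked_boxes) == box_count:
--             return True
--     return False
-- ===== SOURCE B (Python) =====
-- def can_open_all_boxes(boxes):
--     """
--     Determines if all boxes in a given list can be opened.
--
--     Table-first formulation: collect every valid key found in any box (keys
--     equal to their own box index don't count), then check each box index.
--     """
--     n = len(boxes)
--     reachable = {k for i, keys in enumerate(boxes) for k in keys
--                  if 0 <= k < n and k != i}
--     return n > 0 and all(j == 0 or not keys or j in reachable
--                          for j, keys in enumerate(boxes))
-- ===== Notes on version B (the rewrite author's own statement) =====
-- stated objective: alternative
-- what changed: A's single accumulating sweep with an early return and a per-iteration size check is replaced by a table-first computation: build the set of all valid keys once, then decide each box index independently with an all() over enumerate.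
import Mathlib
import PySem

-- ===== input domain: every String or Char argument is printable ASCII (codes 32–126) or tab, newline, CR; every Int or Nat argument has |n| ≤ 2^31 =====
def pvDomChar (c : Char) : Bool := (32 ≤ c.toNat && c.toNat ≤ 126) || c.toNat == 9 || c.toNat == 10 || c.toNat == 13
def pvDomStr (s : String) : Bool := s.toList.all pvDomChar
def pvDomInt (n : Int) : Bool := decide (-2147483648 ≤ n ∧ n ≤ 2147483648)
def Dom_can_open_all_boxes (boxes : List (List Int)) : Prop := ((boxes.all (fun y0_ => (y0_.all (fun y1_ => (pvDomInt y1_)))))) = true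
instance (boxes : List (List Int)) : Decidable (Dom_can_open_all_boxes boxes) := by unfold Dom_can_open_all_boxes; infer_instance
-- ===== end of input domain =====

-- B replaces A's single accumulating sweep with early return by a table-first pass
-- (collect all valid keys once) followed by a per-index all() check (objective: alternative).

-- ===== PORT A =====
-- the inner 'for key in keys' loop of A
def aAddKeys (n idx : Int) (s : PySem.Set Int) (keys : List Int) : PySem.Set Int :=
  keys.foldl (fun acc k => if 0 ≤ k ∧ k < n ∧ k ≠ idx then PySem.Set.add acc k else acc) s

-- one iteration of A's outer loop (the set after processing box idx)
def aStep (n idx : Int) (s : PySem.Set Int) (keys : List Int) : PySem.Set Int :=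
  aAddKeys n idx (if keys = [] ∨ idx = 0 then PySem.Set.add s idx else s) keys

-- A's outer loop with its early 'return True'
def aLoop (n : Int) : List (List Int) → Int → PySem.Set Int → Bool
  | [], _, _ => false
  | keys :: rest, idx, s =>
    let s2 := aStep n idx s keys
    if PySem.Set.len s2 = n then true else aLoop n rest (idx + 1) s2

def can_open_all_boxes (boxes : List (List Int)) : Bool :=
  aLoop (boxes.length : Int) boxes 0 PySem.Set.empty

-- ===== PORT B =====
-- the set-comprehension's generated list, in generation order
def bReachList (n : Int) (boxes : List (List Int)) : List Int :=
  (PySem.List.enumerate boxes).flatMap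
    (fun p => p.2.filter (fun k => decide (0 ≤ k ∧ k < n ∧ k ≠ p.1)))

def can_open_all_boxes_alt (boxes : List (List Int)) : Bool :=
  let n : Int := (boxes.length : Int)
  let reachable : PySem.Set Int := PySem.Set.ofList (bReachList n boxes)
  decide (0 < n) &&
    (PySem.List.enumerate boxes).all
      (fun p => p.1 == 0 || p.2.isEmpty || PySem.Set.contains reachable p.1)

-- ===== PRECONDITION & SPEC =====
def Spec_can_open_all_boxes (boxes : List (List Int)) (out : Bool) : Prop := out = can_open_all_boxes_alt boxes
instance (boxes : List (List Int)) (out : Bool) : Decidable (Spec_can_open_all_boxes boxes out) := by unfold Spec_can_open_all_boxes; infer_instance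

-- ===== CLAIM (what is proved, stated in full; the proofs are below) =====
def Claim_equal_can_open_all_boxes : Prop := ∀ (boxes : List (List Int)), Dom_can_open_all_boxes boxes → Spec_can_open_all_boxes boxes (can_open_all_boxes boxes)

-- ===== LEMMAS AND PROOFS =====

-- A's loop without the early return: the set after the whole sweep
def fullF (n : Int) : List (List Int) → Int → PySem.Set Int → PySem.Set Int
  | [], _, s => s
  | keys :: rest, idx, s => fullF n rest (idx + 1) (aStep n idx s keys)

theorem add_prefix (s : PySem.Set Int) (x : Int) : ∃ t, PySem.Set.add s x = s ++ t := by
  unfold PySem.Set.add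
  split
  · exact ⟨[], by simp⟩
  · exact ⟨[x], rfl⟩

theorem aAddKeys_prefix (n idx : Int) (keys : List Int) (s : PySem.Set Int) :
    ∃ t, aAddKeys n idx s keys = s ++ t := by
  induction keys generalizing s with
  | nil => exact ⟨[], by simp [aAddKeys]⟩
  | cons k ks ih =>
      have hun : aAddKeys n idx s (k :: ks) =
          aAddKeys n idx (if 0 ≤ k ∧ k < n ∧ k ≠ idx then PySem.Set.add s k else s) ks := rfl
      rw [hun]
      split
      · obtain ⟨u, hu⟩ := add_prefix s k
        obtain ⟨v, hv⟩ := ih (PySem.Set.add s k)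
        exact ⟨u ++ v, by rw [hv, hu, List.append_assoc]⟩
      · exact ih s

theorem aStep_prefix (n idx : Int) (keys : List Int) (s : PySem.Set Int) :
    ∃ t, aStep n idx s keys = s ++ t := by
  unfold aStep
  split
  · obtain ⟨u, hu⟩ := add_prefix s idx
    obtain ⟨v, hv⟩ := aAddKeys_prefix n idx keys (PySem.Set.add s idx)
    exact ⟨u ++ v, by rw [hv, hu, List.append_assoc]⟩
  · exact aAddKeys_prefix n idx keys s

theorem fullF_prefix (n : Int) (l : List (List Int)) (idx : Int) (s : PySem.Set Int) :
    ∃ t, fullF n l idx s = s ++ t := by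
  induction l generalizing idx s with
  | nil => exact ⟨[], by simp [fullF]⟩
  | cons keys rest ih =>
      obtain ⟨u, hu⟩ := aStep_prefix n idx keys s
      obtain ⟨v, hv⟩ := ih (idx + 1) (aStep n idx s keys)
      exact ⟨u ++ v, by rw [fullF, hv, hu, List.append_assoc]⟩

theorem mem_aAddKeys (n idx : Int) (keys : List Int) (s : PySem.Set Int) (x : Int) :
    x ∈ aAddKeys n idx s keys ↔ x ∈ s ∨ (x ∈ keys ∧ 0 ≤ x ∧ x < n ∧ x ≠ idx) := by
  induction keys generalizing s with
  | nil => simp [aAddKeys]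
  | cons k ks ih =>
      have hun : aAddKeys n idx s (k :: ks) =
          aAddKeys n idx (if 0 ≤ k ∧ k < n ∧ k ≠ idx then PySem.Set.add s k else s) ks := rfl
      rw [hun]
      split
      · rw [ih, PySem.Set.mem_add]
        constructor
        · rintro ((h | rfl) | ⟨h1, h2⟩)
          · exact Or.inl h
          · exact Or.inr ⟨List.mem_cons_self, by assumption⟩
          · exact Or.inr ⟨List.mem_cons_of_mem _ h1, h2⟩
        · rintro (h | ⟨h1, h2⟩)
          · exact Or.inl (Or.inl h)
          · rcases List.mem_cons.mp h1 with rfl | h1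
            · exact Or.inl (Or.inr rfl)
            · exact Or.inr ⟨h1, h2⟩
      · rw [ih]
        constructor
        · rintro (h | ⟨h1, h2⟩)
          · exact Or.inl h
          · exact Or.inr ⟨List.mem_cons_of_mem _ h1, h2⟩
        · rintro (h | ⟨h1, h2⟩)
          · exact Or.inl h
          · rcases List.mem_cons.mp h1 with rfl | h1
            · exact absurd h2 (by tauto)
            · exact Or.inr ⟨h1, h2⟩

theorem mem_aStep (n idx : Int) (keys : List Int) (s : PySem.Set Int) (x : Int) :
    x ∈ aStep n idx s keys ↔
      x ∈ s ∨ ((keys = [] ∨ idx = 0) ∧ x = idx) ∨ (x ∈ keys ∧ 0 ≤ x ∧ x < n ∧ x ≠ idx) := by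
  unfold aStep
  split
  · rw [mem_aAddKeys, PySem.Set.mem_add]; tauto
  · rw [mem_aAddKeys]; tauto

theorem nodup_aAddKeys (n idx : Int) (keys : List Int) (s : PySem.Set Int)
    (h : s.Nodup) : (aAddKeys n idx s keys).Nodup := by
  induction keys generalizing s with
  | nil => simpa [aAddKeys] using h
  | cons k ks ih =>
      have hun : aAddKeys n idx s (k :: ks) =
          aAddKeys n idx (if 0 ≤ k ∧ k < n ∧ k ≠ idx then PySem.Set.add s k else s) ks := rfl
      rw [hun]
      split
      · exact ih _ (PySem.Set.nodup_add s k h)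
      · exact ih _ h

theorem nodup_aStep (n idx : Int) (keys : List Int) (s : PySem.Set Int)
    (h : s.Nodup) : (aStep n idx s keys).Nodup := by
  unfold aStep
  split
  · exact nodup_aAddKeys _ _ _ _ (PySem.Set.nodup_add s idx h)
  · exact nodup_aAddKeys _ _ _ _ h

theorem nodup_fullF (n : Int) (l : List (List Int)) (idx : Int) (s : PySem.Set Int)
    (h : s.Nodup) : (fullF n l idx s).Nodup := by
  induction l generalizing idx s with
  | nil => simpa [fullF] using h
  | cons keys rest ih => exact ih _ _ (nodup_aStep n idx keys s h)

theorem mem_fullF (n : Int) (l : List (List Int)) (idx : Int) (s : PySem.Set Int) (x : Int) :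
    x ∈ fullF n l idx s ↔ x ∈ s ∨
      ∃ (k : Nat) (h : k < l.length),
        ((l[k] = [] ∨ idx + k = 0) ∧ x = idx + k) ∨
        (x ∈ l[k] ∧ 0 ≤ x ∧ x < n ∧ x ≠ idx + k) := by
  induction l generalizing idx s with
  | nil => simp [fullF]
  | cons keys rest ih =>
      rw [fullF, ih, mem_aStep]
      constructor
      · rintro ((h | h | h) | ⟨k, hk, h⟩)
        · exact Or.inl h
        · exact Or.inr ⟨0, by simp, Or.inl (by simpa using h)⟩
        · exact Or.inr ⟨0, by simp, Or.inr (by simpa using h)⟩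
        · refine Or.inr ⟨k + 1, by simpa using hk, ?_⟩
          have : idx + 1 + (k : Int) = idx + ((k : Int) + 1) := by ring
          simpa [this] using h
      · rintro (h | ⟨k, hk, h⟩)
        · exact Or.inl (Or.inl h)
        · cases k with
          | zero => exact Or.inl (Or.inr (by simpa using h))
          | succ k =>
              refine Or.inr ⟨k, by simpa using hk, ?_⟩
              have : idx + 1 + (k : Int) = idx + ((k : Int) + 1) := by ring
              simpa [this] using h

theorem bound_fullF (n : Int) (l : List (List Int)) (idx : Int) (s : PySem.Set Int)
    (hs : ∀ x ∈ s, 0 ≤ x ∧ x < n) (hidx : 0 ≤ idx) (hlen : idx + (l.length : Int) = n) :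
    ∀ x ∈ fullF n l idx s, 0 ≤ x ∧ x < n := by
  intro x hx
  rw [mem_fullF] at hx
  rcases hx with h | ⟨k, hk, h⟩
  · exact hs x h
  · rcases h with ⟨_, rfl⟩ | ⟨_, h1, h2, _⟩
    · constructor
      · positivity
      · have : (k : Int) < (l.length : Int) := by exact_mod_cast hk
        omega
    · exact ⟨h1, h2⟩

theorem len_le (n : Int) (s : List Int) (hn : 0 ≤ n) (hnd : s.Nodup)
    (hb : ∀ x ∈ s, 0 ≤ x ∧ x < n) : (s.length : Int) ≤ n := by
  have hsub : s.toFinset ⊆ Finset.Ico 0 n := by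
    intro x hx
    rw [List.mem_toFinset] at hx
    rw [Finset.mem_Ico]
    exact hb x hx
  have := Finset.card_le_card hsub
  rw [List.toFinset_card_of_nodup hnd, Int.card_Ico] at this
  omega

theorem len_eq_iff (n : Int) (s : List Int) (hn : 0 ≤ n) (hnd : s.Nodup)
    (hb : ∀ x ∈ s, 0 ≤ x ∧ x < n) :
    ((s.length : Int) = n ↔ ∀ j : Int, 0 ≤ j → j < n → j ∈ s) := by
  have hsub : s.toFinset ⊆ Finset.Ico 0 n := by
    intro x hx
    rw [List.mem_toFinset] at hx
    rw [Finset.mem_Ico]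
    exact hb x hx
  constructor
  · intro hlen j hj0 hjn
    have hcard : (Finset.Ico 0 n).card ≤ s.toFinset.card := by
      rw [List.toFinset_card_of_nodup hnd, Int.card_Ico]
      omega
    have heq := Finset.eq_of_subset_of_card_le hsub hcard
    have : j ∈ s.toFinset := by rw [heq, Finset.mem_Ico]; exact ⟨hj0, hjn⟩
    exact List.mem_toFinset.mp this
  · intro h
    have hsup : Finset.Ico 0 n ⊆ s.toFinset := by
      intro x hx
      rw [Finset.mem_Ico] at hx
      exact List.mem_toFinset.mpr (h x hx.1 hx.2)
    have h1 := Finset.card_le_card hsub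
    have h2 := Finset.card_le_card hsup
    rw [List.toFinset_card_of_nodup hnd, Int.card_Ico] at h1 h2
    omega

theorem aLoop_eq (n : Int) (l : List (List Int)) (idx : Int) (s : PySem.Set Int)
    (hnd : s.Nodup) (hb : ∀ x ∈ s, 0 ≤ x ∧ x < n) (hidx : 0 ≤ idx)
    (hlen : idx + (l.length : Int) = n) :
    (aLoop n l idx s = true ↔ l ≠ [] ∧ PySem.Set.len (fullF n l idx s) = n) := by
  induction l generalizing idx s with
  | nil => simp [aLoop]
  | cons keys rest ih =>
      have hnd2 : (aStep n idx s keys).Nodup := nodup_aStep n idx keys s hnd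
      have hidx_lt : idx < n := by
        have : (0 : Int) ≤ (rest.length : Int) := by positivity
        simp only [List.length_cons] at hlen
        push_cast at hlen
        omega
      have hb2 : ∀ x ∈ aStep n idx s keys, 0 ≤ x ∧ x < n := by
        intro x hx
        rw [mem_aStep] at hx
        rcases hx with h | ⟨_, rfl⟩ | ⟨_, h1, h2, _⟩
        · exact hb x h
        · exact ⟨hidx, hidx_lt⟩
        · exact ⟨h1, h2⟩
      have hlen2 : idx + 1 + (rest.length : Int) = n := by
        simp only [List.length_cons] at hlen
        push_cast at hlen
        omega
      have hstep : aLoop n (keys :: rest) idx s =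
          if PySem.Set.len (aStep n idx s keys) = n then true
          else aLoop n rest (idx + 1) (aStep n idx s keys) := rfl
      rw [hstep]
      split
      · rename_i hfire
        constructor
        · intro _
          refine ⟨by simp, ?_⟩
          obtain ⟨t, ht⟩ := fullF_prefix n rest (idx + 1) (aStep n idx s keys)
          have hge : (aStep n idx s keys).length ≤ (fullF n rest (idx + 1) (aStep n idx s keys)).length := by
            rw [ht]; simp
          have hle := len_le n _ (by omega) (nodup_fullF n rest (idx + 1) _ hnd2)
            (bound_fullF n rest (idx + 1) _ hb2 (by omega) hlen2)
          unfold PySem.Set.len at hfire ⊢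
          show ((fullF n rest (idx + 1) (aStep n idx s keys)).length : Int) = n
          omega
        · intro _; rfl
      · rename_i hfire
        rw [ih (idx + 1) (aStep n idx s keys) hnd2 hb2 (by omega) hlen2]
        show rest ≠ [] ∧ _ ↔ keys :: rest ≠ [] ∧ _
        constructor
        · rintro ⟨_, h⟩; exact ⟨by simp, h⟩
        · rintro ⟨_, h⟩
          refine ⟨?_, h⟩
          rintro rfl
          exact hfire (by simpa [fullF] using h)

theorem mem_bReachList (n : Int) (boxes : List (List Int)) (x : Int) :
    x ∈ bReachList n boxes ↔
      ∃ (k : Nat) (h : k < boxes.length),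
        x ∈ boxes[k] ∧ 0 ≤ x ∧ x < n ∧ x ≠ (k : Int) := by
  unfold bReachList
  rw [List.mem_flatMap]
  constructor
  · rintro ⟨p, hp, hx⟩
    rw [PySem.List.mem_enumerate_iff] at hp
    obtain ⟨k, hk, rfl⟩ := hp
    rw [List.mem_filter] at hx
    refine ⟨k, hk, hx.1, ?_⟩
    have := of_decide_eq_true hx.2
    simpa using this
  · rintro ⟨k, hk, h1, h2, h3, h4⟩
    refine ⟨((k : Int), boxes[k]), ?_, ?_⟩
    · rw [PySem.List.mem_enumerate_iff]
      exact ⟨k, hk, by simp⟩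
    · rw [List.mem_filter]
      exact ⟨h1, decide_eq_true (by simpa using ⟨h2, h3, h4⟩)⟩

theorem alt_char (boxes : List (List Int)) :
    (can_open_all_boxes_alt boxes = true ↔
      boxes ≠ [] ∧ ∀ (k : Nat) (h : k < boxes.length),
        (k : Int) = 0 ∨ boxes[k] = [] ∨ (k : Int) ∈ bReachList (boxes.length : Int) boxes) := by
  unfold can_open_all_boxes_alt
  simp only [Bool.and_eq_true, decide_eq_true_eq, List.all_eq_true, Bool.or_eq_true,
    beq_iff_eq, List.isEmpty_iff, PySem.Set.contains, List.contains_iff_mem,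
    PySem.Set.mem_ofList]
  constructor
  · rintro ⟨hn, hall⟩
    refine ⟨by rintro rfl; simp at hn, fun k hk => ?_⟩
    have hmem : ((k : Int), boxes[k]) ∈ PySem.List.enumerate boxes 0 := by
      rw [PySem.List.mem_enumerate_iff]; exact ⟨k, hk, by simp⟩
    simpa [or_assoc] using hall _ hmem
  · rintro ⟨hne, hall⟩
    refine ⟨by cases boxes with | nil => exact absurd rfl hne | cons a l => simp, fun p hp => ?_⟩
    rw [PySem.List.mem_enumerate_iff] at hp
    obtain ⟨k, hk, rfl⟩ := hp
    simpa [or_assoc] using hall k hk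

-- ===== VERDICT (by name: the statement is the Claim_ definition above) =====
theorem can_open_all_boxes_spec : Claim_equal_can_open_all_boxes := by
  intro boxes _
  show can_open_all_boxes boxes = can_open_all_boxes_alt boxes
  have hA : (can_open_all_boxes boxes = true ↔
      boxes ≠ [] ∧ ∀ j : Int, 0 ≤ j → j < (boxes.length : Int) →
        j ∈ fullF (boxes.length : Int) boxes 0 PySem.Set.empty) := by
    unfold can_open_all_boxes
    rw [aLoop_eq (boxes.length : Int) boxes 0 PySem.Set.empty (by simp [PySem.Set.empty])
      (by simp [PySem.Set.empty]) le_rfl (by simp)]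
    have := len_eq_iff (boxes.length : Int) (fullF (boxes.length : Int) boxes 0 PySem.Set.empty)
      (by positivity)
      (nodup_fullF (boxes.length : Int) boxes 0 _ (by simp [PySem.Set.empty]))
      (bound_fullF (boxes.length : Int) boxes 0 _ (by simp [PySem.Set.empty]) le_rfl (by simp))
    unfold PySem.Set.len
    rw [this]
  have hB := alt_char boxes
  rw [Bool.eq_iff_iff, hA, hB]
  constructor
  · rintro ⟨hne, h⟩
    refine ⟨hne, ?_⟩
    intro k hk
    have hj := h (k : Int) (by positivity) (by exact_mod_cast hk)
    rw [mem_fullF] at hj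
    rcases hj with hj | ⟨m, hm, hj⟩
    · simp [PySem.Set.empty] at hj
    · rcases hj with ⟨hcond, heq⟩ | ⟨h1, h2, h3, h4⟩
      · have hkm : k = m := by
          have : (k : Int) = (m : Int) := by simpa using heq
          exact_mod_cast this
        subst hkm
        rcases hcond with h | h
        · exact Or.inr (Or.inl h)
        · exact Or.inl (by simpa using h)
      · refine Or.inr (Or.inr ?_)
        rw [mem_bReachList]
        exact ⟨m, hm, h1, h2, h3, by simpa using h4⟩
  · rintro ⟨hne, h⟩
    refine ⟨hne, ?_⟩
    intro j hj0 hjn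
    have hk : j.toNat < boxes.length := by omega
    have hjk : j = (j.toNat : Int) := by omega
    rw [hjk, mem_fullF]
    rcases h j.toNat hk with hc | hc | hc
    · exact Or.inr ⟨j.toNat, hk, Or.inl ⟨Or.inr (by omega), by omega⟩⟩
    · exact Or.inr ⟨j.toNat, hk, Or.inl ⟨Or.inl hc, by omega⟩⟩
    · rw [mem_bReachList] at hc
      obtain ⟨m, hm, h1, h2, h3, h4⟩ := hc
      exact Or.inr ⟨m, hm, Or.inr ⟨h1, h2, h3, by simpa using h4⟩⟩
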